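-- pv_equiv track=rewrite | github.com/amcintosh994-beep/zork-i-cartographic-atlas | scripts/normalize_rooms_schema_authoritative.py | parse_string_section
-- ===== SOURCE A (Python) =====
-- from typing import Any, Dict, List, Tuple, Optional
-- from typing import List, Dict
--
-- def parse_string_section(raw_lines: List[str]) -> str:
--     start = 0
--     end = len(raw_lines)
--     while start < end and raw_lines[start].strip() == "":
--         start += 1
--     while end > start and raw_lines[end - 1].strip() == "":
--         end -= 1
--     return "\n".join(raw_lines[start:end]).strip()
-- ===== SOURCE B (Python) =====
-- from typing import List
--
-- def parse_string_section(raw_lines: List[str]) -> str: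
--     return "\n".join(raw_lines).strip()
-- ===== Notes on version B (the rewrite author's own statement) =====
-- stated objective: simpler
-- what changed: Drops both index-trimming while-loops and the slice: blank boundary lines are whitespace-only, so the final strip() already removes them; B is a single join-then-strip expression maintaining no indices.
import Mathlib
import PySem

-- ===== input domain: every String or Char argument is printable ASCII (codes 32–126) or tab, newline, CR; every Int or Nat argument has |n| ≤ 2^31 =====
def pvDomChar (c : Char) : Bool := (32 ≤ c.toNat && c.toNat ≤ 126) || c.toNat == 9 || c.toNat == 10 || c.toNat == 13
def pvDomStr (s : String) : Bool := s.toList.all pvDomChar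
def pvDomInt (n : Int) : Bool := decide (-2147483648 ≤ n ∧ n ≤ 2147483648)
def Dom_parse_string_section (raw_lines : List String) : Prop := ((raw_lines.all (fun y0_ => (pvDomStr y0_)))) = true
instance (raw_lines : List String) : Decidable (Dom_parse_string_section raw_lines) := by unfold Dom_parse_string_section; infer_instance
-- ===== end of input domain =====

-- B replaces A's two index-trimming while-loops and slice by a single join-then-strip
-- expression (the final strip already removes the blank boundary lines); objective: simpler.

-- ===== PORT A =====
-- first while-loop: advance start while the line at start strips to ""
def pvLoopStartA (xs : List String) (start e : Nat) : Nat :=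
  if start < e ∧ (PySem.Str.strip (xs.getD start "") == "") = true then
    pvLoopStartA xs (start + 1) e
  else start
termination_by e - start
decreasing_by omega

-- second while-loop: retreat end while the line at end-1 strips to ""
def pvLoopEndA (xs : List String) (start e : Nat) : Nat :=
  if start < e ∧ (PySem.Str.strip (xs.getD (e - 1) "") == "") = true then
    pvLoopEndA xs start (e - 1)
  else e
termination_by e
decreasing_by omega

def parse_string_section (raw_lines : List String) : String :=
  let start := pvLoopStartA raw_lines 0 raw_lines.length
  let e := pvLoopEndA raw_lines start raw_lines.length
  PySem.Str.strip (PySem.Str.join "\n"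
    (PySem.List.slice raw_lines (some (start : Int)) (some (e : Int))))

-- ===== PORT B =====
def parse_string_section_alt (raw_lines : List String) : String :=
  PySem.Str.strip (PySem.Str.join "\n" raw_lines)

-- ===== PRECONDITION & SPEC =====
def Spec_parse_string_section (raw_lines : List String) (out : String) : Prop := out = parse_string_section_alt raw_lines
instance (raw_lines : List String) (out : String) : Decidable (Spec_parse_string_section raw_lines out) := by unfold Spec_parse_string_section; infer_instance

-- ===== CLAIM (what is proved, stated in full; the proofs are below) =====
def Claim_equal_parse_string_section : Prop := ∀ (raw_lines : List String), Dom_parse_string_section raw_lines → Spec_parse_string_section raw_lines (parse_string_section raw_lines)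

-- ===== LEMMAS AND PROOFS =====

-- the per-line "blank" test A uses
def pvWsLine (l : String) : Bool := PySem.Str.strip l == ""

-- a line strips to "" exactly when all its characters are whitespace
theorem pvStrip_nil_iff (cs : List Char) :
    PySem.Chars.strip cs = [] ↔ ∀ c ∈ cs, PySem.Chars.isspace c = true := by
  constructor
  · intro h c hc
    have hsplit := List.takeWhile_append_dropWhile (p := PySem.Chars.isspace) (l := cs)
    have hdrop : ∀ c ∈ (List.dropWhile PySem.Chars.isspace cs).reverse, PySem.Chars.isspace c = true := by
      have h' := h
      simp only [PySem.Chars.strip, PySem.Chars.rstrip, PySem.Chars.lstrip] at h'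
      exact List.dropWhile_eq_nil_iff.mp (by simpa using h')
    rw [← hsplit] at hc
    rcases List.mem_append.mp hc with h1 | h2
    · exact List.mem_takeWhile_imp h1
    · exact hdrop c (List.mem_reverse.mpr h2)
  · intro h
    have h1 : List.dropWhile PySem.Chars.isspace cs = [] := List.dropWhile_eq_nil_iff.mpr h
    simp [PySem.Chars.strip, PySem.Chars.lstrip, PySem.Chars.rstrip, h1]

theorem pvWsLine_iff (l : String) :
    pvWsLine l = true ↔ ∀ c ∈ l.toList, PySem.Chars.isspace c = true := by
  rw [← pvStrip_nil_iff]
  unfold pvWsLine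
  constructor
  · intro h
    have : PySem.Str.strip l = "" := by simpa using h
    have := congrArg String.toList this
    simpa [PySem.Str.toList_strip] using this
  · intro h
    have : (PySem.Str.strip l).toList = ("" : String).toList := by
      simpa [PySem.Str.toList_strip] using h
    simp [String.toList_inj.mp this]

-- stripping ignores an all-whitespace prefix
theorem pvStrip_ws_append (w cs : List Char) (hw : ∀ c ∈ w, PySem.Chars.isspace c = true) :
    PySem.Chars.strip (w ++ cs) = PySem.Chars.strip cs := by
  have h1 : List.dropWhile PySem.Chars.isspace w = [] := List.dropWhile_eq_nil_iff.mpr hw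
  simp [PySem.Chars.strip, PySem.Chars.lstrip, List.dropWhile_append, h1]

-- stripping ignores an all-whitespace suffix
theorem pvStrip_append_ws (cs w : List Char) (hw : ∀ c ∈ w, PySem.Chars.isspace c = true) :
    PySem.Chars.strip (cs ++ w) = PySem.Chars.strip cs := by
  have hwnil : List.dropWhile PySem.Chars.isspace w = [] := List.dropWhile_eq_nil_iff.mpr hw
  have hwrev : List.dropWhile PySem.Chars.isspace w.reverse = [] :=
    List.dropWhile_eq_nil_iff.mpr (fun c hc => hw c (List.mem_reverse.mp hc))
  simp only [PySem.Chars.strip, PySem.Chars.lstrip, PySem.Chars.rstrip]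
  by_cases h : List.dropWhile PySem.Chars.isspace cs = []
  · rw [List.dropWhile_append, if_pos (by simp [h])]
    simp [h, hwnil]
  · rw [List.dropWhile_append, if_neg (by simp [h]), List.reverse_append,
      List.dropWhile_append, hwrev]
    simp

-- join over "\n" with an all-lines view
def pvJ (xs : List String) : List Char :=
  PySem.Chars.join ['\n'] (xs.map String.toList)

theorem pvJ_cons (l : String) (r : String) (rs : List String) :
    pvJ (l :: r :: rs) = l.toList ++ '\n' :: pvJ (r :: rs) := by
  simp [pvJ, PySem.Chars.join, List.intercalate]

theorem pvJ_concat (xs : List String) (a : String) (hx : xs ≠ []) :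
    pvJ (xs ++ [a]) = pvJ xs ++ '\n' :: a.toList := by
  induction xs with
  | nil => exact absurd rfl hx
  | cons y ys ih =>
    cases ys with
    | nil => simp [pvJ, PySem.Chars.join, List.intercalate]
    | cons z zs =>
      have hrec := ih (by simp)
      simp only [List.cons_append] at hrec ⊢
      rw [pvJ_cons, pvJ_cons, hrec]
      simp

-- dropping all-blank leading lines does not change the stripped join
theorem pvFront (xs : List String) :
    PySem.Chars.strip (pvJ (xs.dropWhile pvWsLine)) = PySem.Chars.strip (pvJ xs) := by
  induction xs with
  | nil => rfl
  | cons l rest ih =>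
    by_cases hl : pvWsLine l = true
    · rw [List.dropWhile_cons_of_pos hl, ih]
      cases rest with
      | nil =>
        have hstrip : PySem.Chars.strip l.toList = [] :=
          (pvStrip_nil_iff l.toList).mpr ((pvWsLine_iff l).mp hl)
        simpa [pvJ, PySem.Chars.join, List.intercalate, PySem.Chars.strip,
          PySem.Chars.lstrip, PySem.Chars.rstrip] using hstrip.symm
      | cons r rs =>
        have hws : ∀ c ∈ l.toList ++ ['\n'], PySem.Chars.isspace c = true := by
          intro c hc
          rcases List.mem_append.mp hc with h1 | h2
          · exact (pvWsLine_iff l).mp hl c h1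
          · simp at h2; subst h2; decide
        rw [pvJ_cons]
        have hform : l.toList ++ '\n' :: pvJ (r :: rs) = (l.toList ++ ['\n']) ++ pvJ (r :: rs) := by
          simp
        rw [hform, pvStrip_ws_append _ _ hws]
    · rw [List.dropWhile_cons_of_neg hl]

-- dropping all-blank trailing lines does not change the stripped join
theorem pvBack (xs : List String) :
    PySem.Chars.strip (pvJ (xs.rdropWhile pvWsLine)) = PySem.Chars.strip (pvJ xs) := by
  induction xs using List.reverseRecOn with
  | nil => rfl
  | append_singleton ys a ih =>
    by_cases ha : pvWsLine a = true
    · rw [List.rdropWhile_concat_pos _ _ _ ha, ih]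
      have haws : ∀ c ∈ a.toList, PySem.Chars.isspace c = true := (pvWsLine_iff a).mp ha
      cases hys : ys with
      | nil =>
        have hstrip : PySem.Chars.strip a.toList = [] := (pvStrip_nil_iff a.toList).mpr haws
        simpa [pvJ, PySem.Chars.join, List.intercalate, PySem.Chars.strip,
          PySem.Chars.lstrip, PySem.Chars.rstrip] using hstrip.symm
      | cons z zs =>
        rw [← hys, pvJ_concat ys a (by simp [hys])]
        have hws : ∀ c ∈ '\n' :: a.toList, PySem.Chars.isspace c = true := by
          intro c hc
          rcases List.mem_cons.mp hc with h1 | h2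
          · subst h1; decide
          · exact haws c h2
        exact (pvStrip_append_ws _ _ hws).symm
    · rw [List.rdropWhile_concat_neg _ _ _ ha]

-- the first loop computes the dropWhile of the blank-line test
theorem pvLoopStartA_spec (xs : List String) (start e : Nat) (he : e = xs.length) :
    start ≤ e →
      pvLoopStartA xs start e ≤ e ∧
      xs.drop (pvLoopStartA xs start e) = (xs.drop start).dropWhile pvWsLine := by
  subst he
  fun_induction pvLoopStartA xs start xs.length with
  | case1 start h ih =>
    intro _
    have hlt : start < xs.length := h.1
    obtain ⟨ih1, ih2⟩ := ih hlt
    refine ⟨ih1, ?_⟩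
    rw [ih2, List.drop_eq_getElem_cons hlt, List.dropWhile_cons_of_pos]
    simpa [pvWsLine, List.getD_eq_getElem?_getD, List.getElem?_eq_getElem hlt] using h.2
  | case2 start h =>
    intro hs
    refine ⟨hs, ?_⟩
    by_cases hlt : start < xs.length
    · have hcond : ¬ (PySem.Str.strip (xs.getD start "") == "") = true := by tauto
      rw [List.drop_eq_getElem_cons hlt, List.dropWhile_cons_of_neg]
      simpa [pvWsLine, List.getD_eq_getElem?_getD, List.getElem?_eq_getElem hlt] using hcond
    · have hge : xs.length ≤ start := by omega
      simp [List.drop_eq_nil_of_le hge]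

-- the second loop computes the rdropWhile of the blank-line test on the kept segment
theorem pvLoopEndA_spec (xs : List String) (s e : Nat) :
    e ≤ xs.length → s ≤ e →
      s ≤ pvLoopEndA xs s e ∧ pvLoopEndA xs s e ≤ e ∧
      (xs.drop s).take (pvLoopEndA xs s e - s) =
        ((xs.drop s).take (e - s)).rdropWhile pvWsLine := by
  fun_induction pvLoopEndA xs s e with
  | case1 e h ih =>
    intro he _
    have hlt : s < e := h.1
    obtain ⟨ih1, ih2, ih3⟩ := ih (by omega) (by omega)
    refine ⟨ih1, by omega, ?_⟩
    rw [ih3]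
    have hidx : e - 1 < xs.length := by omega
    have hsplit : (xs.drop s).take (e - s) = (xs.drop s).take (e - 1 - s) ++ [xs[e - 1]] := by
      have h1 : e - s = (e - 1 - s) + 1 := by omega
      rw [h1, List.take_add_one]
      have h2 : (xs.drop s)[e - 1 - s]? = some xs[e - 1] := by
        rw [List.getElem?_drop]
        have h3 : s + (e - 1 - s) = e - 1 := by omega
        rw [h3, List.getElem?_eq_getElem hidx]
      rw [h2]
      rfl
    rw [hsplit, List.rdropWhile_concat_pos]
    simpa [pvWsLine, List.getD_eq_getElem?_getD, List.getElem?_eq_getElem hidx] using h.2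
  | case2 e h =>
    intro he hs
    refine ⟨hs, le_refl _, ?_⟩
    by_cases hlt : s < e
    · have hcond : ¬ (PySem.Str.strip (xs.getD (e - 1) "") == "") = true := by tauto
      have hidx : e - 1 < xs.length := by omega
      have hsplit : (xs.drop s).take (e - s) = (xs.drop s).take (e - 1 - s) ++ [xs[e - 1]] := by
        have h1 : e - s = (e - 1 - s) + 1 := by omega
        rw [h1, List.take_add_one]
        have h2 : (xs.drop s)[e - 1 - s]? = some xs[e - 1] := by
          rw [List.getElem?_drop]
          have h3 : s + (e - 1 - s) = e - 1 := by omega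
          rw [h3, List.getElem?_eq_getElem hidx]
        rw [h2]
        rfl
      rw [hsplit, List.rdropWhile_concat_neg, ← hsplit]
      simpa [pvWsLine, List.getD_eq_getElem?_getD, List.getElem?_eq_getElem hidx] using hcond
    · have heq : e = s := by omega
      subst heq
      simp [List.rdropWhile]

-- ===== VERDICT (by name: the statement is the Claim_ definition above) =====
theorem parse_string_section_spec : Claim_equal_parse_string_section := by
  intro xs _
  simp only [Spec_parse_string_section, parse_string_section, parse_string_section_alt]
  obtain ⟨hs_le, hdrop⟩ :=
    pvLoopStartA_spec xs 0 xs.length rfl (Nat.zero_le _)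
  obtain ⟨hse, he_le, htake⟩ :=
    pvLoopEndA_spec xs (pvLoopStartA xs 0 xs.length) xs.length (le_refl _) hs_le
  rw [List.drop_zero] at hdrop
  have hseg : PySem.List.slice xs (some ((pvLoopStartA xs 0 xs.length : Nat) : Int))
      (some ((pvLoopEndA xs (pvLoopStartA xs 0 xs.length) xs.length : Nat) : Int)) =
      (xs.dropWhile pvWsLine).rdropWhile pvWsLine := by
    rw [PySem.List.slice_toNat xs (Int.natCast_nonneg _) (Int.natCast_nonneg _)]
    simp only [Int.toNat_natCast]
    have hfull : (xs.drop (pvLoopStartA xs 0 xs.length)).take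
        (xs.length - pvLoopStartA xs 0 xs.length) = xs.drop (pvLoopStartA xs 0 xs.length) := by
      rw [← List.length_drop (l := xs), List.take_length]
    rw [htake, hfull, hdrop]
  rw [hseg, ← String.toList_inj, PySem.Str.toList_strip, PySem.Str.toList_strip,
    PySem.Str.toList_join, PySem.Str.toList_join]
  have hnl : ("\n" : String).toList = ['\n'] := rfl
  rw [hnl]
  show PySem.Chars.strip (pvJ ((xs.dropWhile pvWsLine).rdropWhile pvWsLine)) =
    PySem.Chars.strip (pvJ xs)
  rw [pvBack, pvFront]
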